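-- pv_equiv track=rewrite | github.com/liuwei464976266/mygit | play/接口.py | getColsSymbol
-- ===== SOURCE A (Python) =====
-- def getColsSymbol(points):#取出各列中奖位置
--     symbol12_list = []
--     col1, col2, col3, col4, col5 = {}, {}, {}, {}, {}
--     for i in range(len(points)):
--         if points[i] == 12:
--             symbol12_list.append(i)
--         elif i % 5 == 0:
--             col1[i] = points[i]
--         elif i % 5 == 1:
--             col2[i] = points[i]
--         elif i % 5 == 2:
--             col3[i] = points[i]
--         elif i % 5 == 3:
--             col4[i] = points[i]
--         elif i % 5 == 4:
--             col5[i] = points[i]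
--     return col1,col2,col3,col4,col5,symbol12_list
-- ===== SOURCE B (Python) =====
-- def getColsSymbol(points):  # strided comprehensions instead of one modulo-branched index loop
--     n = len(points)
--     symbol12_list = [i for i in range(n) if points[i] == 12]
--     col1, col2, col3, col4, col5 = (
--         {i: points[i] for i in range(k, n, 5) if points[i] != 12} for k in range(5)
--     )
--     return col1, col2, col3, col4, col5, symbol12_list
-- ===== Notes on version B (the rewrite author's own statement) =====
-- stated objective: idiomatic
-- what changed: Replaces the single index loop with a modulo branch-ladder by one filter comprehension for the 12-positions plus five strided range(k, n, 5) dict comprehensions, one per column.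
import Mathlib
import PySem

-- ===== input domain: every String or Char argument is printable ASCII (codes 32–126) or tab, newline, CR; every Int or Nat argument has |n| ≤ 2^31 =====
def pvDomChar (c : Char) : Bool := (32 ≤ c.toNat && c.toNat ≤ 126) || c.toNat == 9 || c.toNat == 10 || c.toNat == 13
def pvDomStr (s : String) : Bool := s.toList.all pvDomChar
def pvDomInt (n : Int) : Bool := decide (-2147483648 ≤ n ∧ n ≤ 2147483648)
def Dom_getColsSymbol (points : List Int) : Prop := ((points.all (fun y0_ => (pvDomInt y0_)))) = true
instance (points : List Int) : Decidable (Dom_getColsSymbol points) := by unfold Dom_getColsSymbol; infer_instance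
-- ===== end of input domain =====

-- B replaces A's single modulo-branched index loop by one filter pass for the 12-positions
-- plus five strided range(k, n, 5) comprehensions, one per column (idiomatic; same cost).

-- ===== PORT A =====
-- the loop body of A: branch on points[i] == 12, then on i % 5 (keys are distinct, so the
-- Python dict update col[i] = points[i] is exactly an append of the pair)
def pvStepA (points : List Int)
    (st : (List (Int × Int)) × (List (Int × Int)) × (List (Int × Int)) × (List (Int × Int)) × (List (Int × Int)) × List Int)
    (i : Int) :
    (List (Int × Int)) × (List (Int × Int)) × (List (Int × Int)) × (List (Int × Int)) × (List (Int × Int)) × List Int :=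
  match st with
  | (c1, c2, c3, c4, c5, sym) =>
    let p := PySem.List.pyGetD points i 0
    if p = 12 then (c1, c2, c3, c4, c5, sym ++ [i])
    else if PySem.Int.mod i 5 = 0 then (c1 ++ [(i, p)], c2, c3, c4, c5, sym)
    else if PySem.Int.mod i 5 = 1 then (c1, c2 ++ [(i, p)], c3, c4, c5, sym)
    else if PySem.Int.mod i 5 = 2 then (c1, c2, c3 ++ [(i, p)], c4, c5, sym)
    else if PySem.Int.mod i 5 = 3 then (c1, c2, c3, c4 ++ [(i, p)], c5, sym)
    else if PySem.Int.mod i 5 = 4 then (c1, c2, c3, c4, c5 ++ [(i, p)], sym)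
    else (c1, c2, c3, c4, c5, sym)

def getColsSymbol (points : List Int) : (List (Int × Int)) × (List (Int × Int)) × (List (Int × Int)) × (List (Int × Int)) × (List (Int × Int)) × List Int :=
  (PySem.List.pyRange 0 (points.length : Int) 1).foldl (pvStepA points) ([], [], [], [], [], [])

-- ===== PORT B =====
-- {i: points[i] for i in range(k, n, 5) if points[i] != 12}
def pvColB (points : List Int) (k : Int) : List (Int × Int) :=
  ((PySem.List.pyRange k (points.length : Int) 5).filter
      (fun i => decide (PySem.List.pyGetD points i 0 ≠ 12))).map
    (fun i => (i, PySem.List.pyGetD points i 0))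

def getColsSymbol_alt (points : List Int) : (List (Int × Int)) × (List (Int × Int)) × (List (Int × Int)) × (List (Int × Int)) × (List (Int × Int)) × List Int :=
  let symbol12_list := (PySem.List.pyRange 0 (points.length : Int) 1).filter
      (fun i => decide (PySem.List.pyGetD points i 0 = 12))
  (pvColB points 0, pvColB points 1, pvColB points 2, pvColB points 3, pvColB points 4,
   symbol12_list)

-- ===== PRECONDITION & SPEC =====
def Spec_getColsSymbol (points : List Int) (out : (List (Int × Int)) × (List (Int × Int)) × (List (Int × Int)) × (List (Int × Int)) × (List (Int × Int)) × List Int) : Prop := out = getColsSymbol_alt points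
-- instance synthesis times out on the 6-fold product, so its DecidableEq is assembled by hand
def pvDecL : DecidableEq (List (Int × Int)) := by infer_instance
def pvDec3 : DecidableEq ((List (Int × Int)) × (List (Int × Int)) × List Int) := by infer_instance
def pvDec4 : DecidableEq ((List (Int × Int)) × (List (Int × Int)) × (List (Int × Int)) × List Int) := @instDecidableEqProd _ _ pvDecL pvDec3
def pvDec5 : DecidableEq ((List (Int × Int)) × (List (Int × Int)) × (List (Int × Int)) × (List (Int × Int)) × List Int) := @instDecidableEqProd _ _ pvDecL pvDec4
def pvDec6 : DecidableEq ((List (Int × Int)) × (List (Int × Int)) × (List (Int × Int)) × (List (Int × Int)) × (List (Int × Int)) × List Int) := @instDecidableEqProd _ _ pvDecL pvDec5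
instance (points : List Int) (out : (List (Int × Int)) × (List (Int × Int)) × (List (Int × Int)) × (List (Int × Int)) × (List (Int × Int)) × List Int) : Decidable (Spec_getColsSymbol points out) := by unfold Spec_getColsSymbol; exact pvDec6 out (getColsSymbol_alt points)

-- ===== CLAIM (what is proved, stated in full; the proofs are below) =====
def Claim_equal_getColsSymbol : Prop := ∀ (points : List Int), Dom_getColsSymbol points → Spec_getColsSymbol points (getColsSymbol points)

-- ===== LEMMAS AND PROOFS =====

-- points[i] for a Nat index
def pvGet (points : List Int) (i : Nat) : Int := PySem.List.pyGetD points (i : Int) 0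

-- closed description of column k after processing indices 0..n-1
def pvColSpec (points : List Int) (k n : Nat) : List (Int × Int) :=
  ((List.range n).filter (fun i => decide (i % 5 = k) && decide (pvGet points i ≠ 12))).map
    (fun i => (Int.ofNat i, pvGet points i))

def pvSymSpec (points : List Int) (n : Nat) : List Int :=
  ((List.range n).filter (fun i => decide (pvGet points i = 12))).map Int.ofNat

-- how many indices below n have residue k (k < 5)
def pvCnt (k n : Nat) : Nat := if k < n then (n - k + 4) / 5 else 0

lemma pvRange5_eq (k : Nat) (hk : k < 5) (n : Nat) :
    PySem.List.pyRange (k : Int) (n : Int) 5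
      = ((List.range n).filter (fun i => decide (i % 5 = k))).map Int.ofNat := by
  induction n with
  | zero =>
    rw [PySem.List.pyRange_of_pos _ _ (by norm_num)]
    simp
  | succ n ih =>
    rw [PySem.List.pyRange_of_pos _ _ (by norm_num)] at ih ⊢
    have hcnt : ∀ m : Nat, (if (k : Int) < (m : Int) then (((m : Int) - (k : Int) + 5 - 1) / 5).toNat else 0) = pvCnt k m := by
      intro m
      unfold pvCnt
      split_ifs with h1 h2 h2
      · have hkm : k ≤ m := le_of_lt (by exact_mod_cast h1)
        have h4 : ((m : Int) - (k : Int) + 5 - 1) = ((m - k + 4 : Nat) : Int) := by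
          push_cast [hkm]; ring
        have h5 : ((m - k + 4 : Nat) : Int) / (5 : Int) = (((m - k + 4) / 5 : Nat) : Int) := by
          exact_mod_cast rfl
        rw [h4, h5, Int.toNat_natCast]
      · exact absurd (by exact_mod_cast h1) (by omega)
      · exact absurd (by exact_mod_cast h2) (by omega)
      · rfl
    rw [hcnt] at ih ⊢
    rw [List.range_succ, List.filter_append, List.map_append, ← ih]
    by_cases hm : n % 5 = k
    · have hc1 : pvCnt k (n + 1) = pvCnt k n + 1 := by unfold pvCnt; split_ifs <;> omega
      have hv : (k : Int) + 5 * (pvCnt k n : Int) = (n : Int) := by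
        have : k + 5 * pvCnt k n = n := by unfold pvCnt; split_ifs <;> omega
        exact_mod_cast this
      rw [hc1, List.range_succ, List.map_append]
      simp [hm, hv]
    · have hc1 : pvCnt k (n + 1) = pvCnt k n := by unfold pvCnt; split_ifs <;> omega
      rw [hc1]
      simp [hm]

lemma pvMod5 (n : Nat) : PySem.Int.mod (n : Int) 5 = ((n % 5 : Nat) : Int) := by
  rw [PySem.Int.mod_eq_emod_of_pos (by norm_num : (0:Int) < 5)]
  omega

set_option maxHeartbeats 1000000 in
lemma pvLoopA (points : List Int) (n : Nat) :
    (List.range n).foldl (fun st (i : Nat) => pvStepA points st (i : Int)) ([], [], [], [], [], [])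
      = (pvColSpec points 0 n, pvColSpec points 1 n, pvColSpec points 2 n,
         pvColSpec points 3 n, pvColSpec points 4 n, pvSymSpec points n) := by
  induction n with
  | zero => simp [pvColSpec, pvSymSpec]
  | succ n ih =>
    rw [List.range_succ, List.foldl_append, ih]
    unfold pvColSpec pvSymSpec
    rw [List.range_succ]
    simp only [List.filter_append, List.map_append]
    simp only [List.foldl_cons, List.foldl_nil]
    unfold pvStepA
    simp only [pvMod5]
    by_cases hp : pvGet points n = 12
    · simp_all [pvGet]
    · have hm5 : n % 5 < 5 := Nat.mod_lt _ (by norm_num)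
      rcases h : n % 5 with _ | _ | _ | _ | _ | m
      · simp_all [pvGet]
      · simp_all [pvGet]
      · simp_all [pvGet]
      · simp_all [pvGet]
      · simp_all [pvGet]
      · omega

set_option maxHeartbeats 1000000 in
lemma pvColB_eq (points : List Int) (k : Nat) (hk : k < 5) :
    pvColB points (k : Int) = pvColSpec points k points.length := by
  unfold pvColB pvColSpec
  rw [pvRange5_eq k hk points.length]
  rw [List.filter_map, List.map_map]
  rw [List.filter_filter]
  refine congrArg _ (List.filter_congr ?_)
  intro i _
  simp [pvGet, Bool.and_comm]

lemma pvSym_eq (points : List Int) :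
    (PySem.List.pyRange 0 (points.length : Int) 1).filter
        (fun i => decide (PySem.List.pyGetD points i 0 = 12))
      = pvSymSpec points points.length := by
  unfold pvSymSpec
  rw [PySem.List.pyRange_zero_natCast, List.filter_map]
  rfl

lemma pvColB_eq0 (points : List Int) : pvColB points 0 = pvColSpec points 0 points.length := pvColB_eq points 0 (by norm_num)
lemma pvColB_eq1 (points : List Int) : pvColB points 1 = pvColSpec points 1 points.length := pvColB_eq points 1 (by norm_num)
lemma pvColB_eq2 (points : List Int) : pvColB points 2 = pvColSpec points 2 points.length := pvColB_eq points 2 (by norm_num)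
lemma pvColB_eq3 (points : List Int) : pvColB points 3 = pvColSpec points 3 points.length := pvColB_eq points 3 (by norm_num)
lemma pvColB_eq4 (points : List Int) : pvColB points 4 = pvColSpec points 4 points.length := pvColB_eq points 4 (by norm_num)

-- ===== VERDICT (by name: the statement is the Claim_ definition above) =====
theorem getColsSymbol_spec : Claim_equal_getColsSymbol := by
  intro points _
  show getColsSymbol points = getColsSymbol_alt points
  unfold getColsSymbol getColsSymbol_alt
  rw [pvSym_eq points]
  rw [PySem.List.pyRange_zero_natCast, List.foldl_map, pvLoopA points points.length]
  dsimp only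
  rw [pvColB_eq0, pvColB_eq1, pvColB_eq2, pvColB_eq3, pvColB_eq4]
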